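-- pv_equiv track=rewrite | github.com/reidpr/quac | lib/u.py | chunker
-- ===== SOURCE A (Python) =====
-- def chunker(seq, p):
--    '''Split sequence seq into p more or less equal sized sublists. If p <
--       len(seq), then return len(seq) sublists of length 1. E.g.:
--
--       >>> chunker('abcdefghijklm', 3)
--       ['abcde', 'fghi', 'jklm']
--       >>> chunker('abc', 4)
--       ['a', 'b', 'c']
--       >>> chunker('', 1)
--       []
--
--       See also groupn().'''
--    # based on http://code.activestate.com/recipes/425397
--    new = []
--    n = len(seq) // p                   # min items per subsequence
--    r = len(seq) % p                    # remaindered items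
--    (b, e) = (0, n + min(1, r))         # first split
--    for i in range(min(p, len(seq))):
--       new.append(seq[b:e])
--       r = max(0, r-1)                  # use up remainders
--       (b, e) = (e, e + n + min(1, r))  # min(1,r) is always 0 or 1
--    return new
-- ===== SOURCE B (Python) =====
-- def chunker(seq, p):
--    '''Split sequence seq into p roughly equal sublists (closed-form boundaries).'''
--    n = len(seq) // p
--    r = len(seq) % p
--    k = min(p, len(seq))
--    return [seq[i*n + min(i, r) : (i+1)*n + min(i+1, r)] for i in range(k)]
-- ===== Notes on version B (the rewrite author's own statement) =====
-- stated objective: simpler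
-- what changed: Replaces the stateful loop carrying (b,e) boundaries and a decrementing remainder with a single comprehension whose chunk boundaries are closed-form functions of the chunk index (i*n+min(i,r)).
import Mathlib
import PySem

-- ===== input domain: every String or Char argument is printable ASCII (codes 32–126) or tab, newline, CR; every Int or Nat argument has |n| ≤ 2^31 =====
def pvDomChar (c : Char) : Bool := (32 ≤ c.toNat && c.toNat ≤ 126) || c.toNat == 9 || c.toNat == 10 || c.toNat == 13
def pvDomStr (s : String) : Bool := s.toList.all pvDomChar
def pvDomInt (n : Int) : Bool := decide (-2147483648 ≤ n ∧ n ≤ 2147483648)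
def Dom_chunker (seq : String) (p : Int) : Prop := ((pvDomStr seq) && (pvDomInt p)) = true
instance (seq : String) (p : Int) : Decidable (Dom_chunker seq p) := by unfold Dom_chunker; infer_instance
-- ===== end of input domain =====

-- B replaces A's stateful (b,e)/decrementing-r loop by a comprehension with closed-form
-- per-chunk boundaries; objective: simpler.

-- ===== PORT A =====
-- literal transliteration of A: accumulator loop over range(min(p, len(seq)))
-- carrying (new, r, b, e)
def chunker (seq : String) (p : Int) : List String :=
  let n := PySem.Int.floordiv (PySem.Str.len seq) p
  let st :=
    (PySem.List.pyRange 0 (min p (PySem.Str.len seq)) 1).foldl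
      (fun (s : List String × Int × Int × Int) _ =>
        let new := s.1 ++ [PySem.Str.slice seq (some s.2.2.1) (some s.2.2.2)]
        let r := max 0 (s.2.1 - 1)
        (new, r, s.2.2.2, s.2.2.2 + n + min 1 r))
      ([], PySem.Int.mod (PySem.Str.len seq) p, 0,
        n + min 1 (PySem.Int.mod (PySem.Str.len seq) p))
  st.1

-- ===== PORT B =====
-- literal transliteration of B: comprehension over range(k) with closed-form slice bounds
def chunker_alt (seq : String) (p : Int) : List String :=
  let n := PySem.Int.floordiv (PySem.Str.len seq) p
  let r := PySem.Int.mod (PySem.Str.len seq) p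
  let k := min p (PySem.Str.len seq)
  (PySem.List.pyRange 0 k 1).map
    (fun i => PySem.Str.slice seq (some (i * n + min i r)) (some ((i + 1) * n + min (i + 1) r)))

-- ===== PRECONDITION & SPEC =====
-- Pre_ excludes exactly p = 0, where the Python A (and B) raise ZeroDivisionError.
def Pre_chunker (seq : String) (p : Int) : Prop := p ≠ 0
instance (seq : String) (p : Int) : Decidable (Pre_chunker seq p) := by unfold Pre_chunker; infer_instance
def pvWitness_chunker : String × Int := ("abcdefghijklm", 3)
def Spec_chunker (seq : String) (p : Int) (out : List String) : Prop := out = chunker_alt seq p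
instance (seq : String) (p : Int) (out : List String) : Decidable (Spec_chunker seq p out) := by unfold Spec_chunker; infer_instance

-- ===== CLAIM (what is proved, stated in full; the proofs are below) =====
def Claim_equal_chunker : Prop := ∀ (seq : String) (p : Int), Dom_chunker seq p → Pre_chunker seq p → Spec_chunker seq p (chunker seq p)

-- ===== LEMMAS AND PROOFS =====

-- Loop invariant: starting A's fold at index i with state (acc, max 0 (r0-i), closed-form b, e),
-- the remaining iterations append exactly B's chunks i, i+1, …, k-1.
theorem chunker_loop_eq (seq : String) (n r0 k : Int) (hr0 : 0 ≤ r0) :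
    ∀ (i : Int) (acc : List String), 0 ≤ i →
      ((PySem.List.pyRange i k 1).foldl
        (fun (s : List String × Int × Int × Int) _ =>
          let new := s.1 ++ [PySem.Str.slice seq (some s.2.2.1) (some s.2.2.2)]
          let r := max 0 (s.2.1 - 1)
          (new, r, s.2.2.2, s.2.2.2 + n + min 1 r))
        (acc, max 0 (r0 - i), i * n + min i r0, (i + 1) * n + min (i + 1) r0)).1
      = acc ++ (PySem.List.pyRange i k 1).map
          (fun j => PySem.Str.slice seq (some (j * n + min j r0)) (some ((j + 1) * n + min (j + 1) r0))) := by
  intro i acc hi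
  by_cases hik : i < k
  · rw [PySem.List.pyRange_one_cons hik]
    have hn : ((k - (i + 1)).toNat) < ((k - i).toNat) := by omega
    have hrec := chunker_loop_eq seq n r0 k hr0 (i + 1)
      (acc ++ [PySem.Str.slice seq (some (i * n + min i r0)) (some ((i + 1) * n + min (i + 1) r0))])
      (by omega)
    simp only [List.foldl_cons, List.map_cons]
    have h1 : max 0 (max 0 (r0 - i) - 1) = max 0 (r0 - (i + 1)) := by omega
    have h2 : (i + 1) * n + min (i + 1) r0 + n + min 1 (max 0 (max 0 (r0 - i) - 1))
        = (i + 1 + 1) * n + min (i + 1 + 1) r0 := by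
      have hmin2 : min (i + 1) r0 + min 1 (max 0 (max 0 (r0 - i) - 1)) = min (i + 1 + 1) r0 := by omega
      have hn2 : (i + 1 + 1) * n = (i + 1) * n + n := by ring
      linarith
    have h2' : (i + 1) * n + min (i + 1) r0 + n + min 1 (max 0 (r0 - (i + 1)))
        = (i + 1 + 1) * n + min (i + 1 + 1) r0 := by rw [← h1]; exact h2
    rw [h1, h2']
    refine hrec.trans ?_
    simp
  · rw [PySem.List.pyRange_one_eq_nil (by omega)]
    simp
termination_by i => (k - i).toNat
decreasing_by omega

-- ===== VERDICT (by name: the statement is the Claim_ definition above) =====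
theorem chunker_spec : Claim_equal_chunker := by
  intro seq p _ hp
  unfold Spec_chunker chunker chunker_alt
  rcases lt_or_gt_of_ne hp with hneg | hpos
  · -- p < 0: len(seq) ≥ 0, so min p len = p < 0 and the range is empty on both sides
    have hlen : (0 : Int) ≤ (seq.length : Int) := by positivity
    have hnil : PySem.List.pyRange 0 (min p ((seq.length : Int))) 1 = [] :=
      PySem.List.pyRange_one_eq_nil (by omega)
    simp [hnil]
  · -- p > 0: apply the loop invariant at i = 0
    have hr0 : 0 ≤ PySem.Int.mod (PySem.Str.len seq) p := PySem.Int.mod_nonneg _ hpos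
    have h := chunker_loop_eq seq (PySem.Int.floordiv (PySem.Str.len seq) p)
      (PySem.Int.mod (PySem.Str.len seq) p) (min p (PySem.Str.len seq)) hr0 0 [] le_rfl
    simp only [zero_mul, zero_add, List.nil_append] at h
    have e0 : min (0 : Int) (PySem.Int.mod (PySem.Str.len seq) p) = 0 := by omega
    have e1 : max 0 (PySem.Int.mod (PySem.Str.len seq) p - 0) = PySem.Int.mod (PySem.Str.len seq) p := by omega
    rw [e0, e1] at h
    simp only [one_mul] at h
    exact h
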